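-- pv_equiv track=rewrite | github.com/nwbort/accc-mergers | scripts/parse_determination.py | parse_text_as_table
-- ===== SOURCE A (Python) =====
-- from typing import Optional, Dict, List, Tuple
--
-- def parse_text_as_table(text: str) -> List[Dict[str, str]]:
--     """
--     Fallback method to parse text as a table when table extraction fails.
--
--     Looks for common patterns in determination documents where items
--     are followed by their details.
--
--     Args:
--         text: Full text of the determination PDF
--
--     Returns:
--         List of dictionaries with 'item' and 'details' keys
--     """
--     table_data = []
--
--     # Common item names in determination documents
--     common_items = [
--         "Notified acquisition",
--         "Determination",
--         "Parties to the Acquisition",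
--         "Date of determination",
--         "Date of notification",
--         "Nature of business activities",
--         "Market definition",
--         "Statement of issues",
--         "Conditions",
--         "Public benefits",
--         "Statutory time period"
--     ]
--
--     lines = text.split('\n')
--     current_item = None
--     current_details = []
--
--     for line in lines:
--         line = line.strip()
--         if not line:
--             continue
--
--         # Check if this line is a known item
--         is_item = False
--         for item in common_items:
--             if line.startswith(item):
--                 # If we have a current item, save it
--                 if current_item:
--                     table_data.append({
--                         'item': current_item,
--                         'details': ' '.join(current_details).strip()
--                     })
--
--                 # Start a new item
--                 current_item = item
--                 # The rest of the line after the item name is the start of details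
--                 current_details = [line[len(item):].strip()]
--                 is_item = True
--                 break
--
--         # If not an item, add to current details
--         if not is_item and current_item:
--             current_details.append(line)
--
--     # Don't forget the last item
--     if current_item:
--         table_data.append({
--             'item': current_item,
--             'details': ' '.join(current_details).strip()
--         })
--
--     return table_data
-- ===== SOURCE B (Python) =====
-- from typing import List, Dict
--
-- _COMMON_ITEMS = [
--     "Notified acquisition",
--     "Determination",
--     "Parties to the Acquisition",
--     "Date of determination",
--     "Date of notification",
--     "Nature of business activities",
--     "Market definition",
--     "Statement of issues",
--     "Conditions",
--     "Public benefits",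
--     "Statutory time period",
-- ]
--
--
-- def parse_text_as_table(text: str) -> List[Dict[str, str]]:
--     # Pass 1: classify each non-empty stripped line as an item token or a detail token.
--     tokens = []
--     for raw in text.split('\n'):
--         line = raw.strip()
--         if not line:
--             continue
--         for item in _COMMON_ITEMS:
--             if line.startswith(item):
--                 tokens.append(('item', item, line[len(item):].strip()))
--                 break
--         else:
--             tokens.append(('detail', line, ''))
--
--     # Pass 2: group the token stream into records, one per item token;
--     # detail tokens before the first item token are dropped.
--     result = []
--     i, n = 0, len(tokens)
--     while i < n:
--         kind, name, rest = tokens[i]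
--         i += 1
--         if kind != 'item':
--             continue
--         parts = [rest]
--         while i < n and tokens[i][0] == 'detail':
--             parts.append(tokens[i][1])
--             i += 1
--         result.append({'item': name, 'details': ' '.join(parts).strip()})
--     return result
-- ===== Notes on version B (the rewrite author's own statement) =====
-- stated objective: alternative
-- what changed: Replaced the single interleaved flush-on-next-item loop (mutable current_item/current_details state) by two passes: a tokenizer that tags each non-empty line as item or detail, then a grouper that consumes each item's following detail-run to emit its record directly.
import Mathlib
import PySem

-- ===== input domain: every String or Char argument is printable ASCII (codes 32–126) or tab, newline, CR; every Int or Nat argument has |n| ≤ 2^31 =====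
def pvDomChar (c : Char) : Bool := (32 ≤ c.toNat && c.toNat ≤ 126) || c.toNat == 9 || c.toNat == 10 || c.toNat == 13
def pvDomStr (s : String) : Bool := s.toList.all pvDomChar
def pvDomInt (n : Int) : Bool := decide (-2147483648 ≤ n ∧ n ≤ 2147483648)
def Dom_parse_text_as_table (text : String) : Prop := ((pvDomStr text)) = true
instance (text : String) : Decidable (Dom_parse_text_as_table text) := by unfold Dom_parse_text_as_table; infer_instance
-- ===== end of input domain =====

-- B replaces A's single interleaved flush-on-next-item loop by two passes (classify lines into
-- tokens, then group each item token with its following detail run); objective: alternative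
-- decomposition, same cost.

-- ===== PORT A =====
-- shared constant: the common_items list of the Python module
def pvCommonItems : List String :=
  ["Notified acquisition", "Determination", "Parties to the Acquisition",
   "Date of determination", "Date of notification", "Nature of business activities",
   "Market definition", "Statement of issues", "Conditions", "Public benefits",
   "Statutory time period"]

-- {'item': item, 'details': ' '.join(details).strip()}
def pvRecord (item : String) (details : List String) : List (String × String) :=
  [("item", item), ("details", PySem.Str.strip (PySem.Str.join " " details))]

-- A's for-loop over lines: state (table_data, current_item, current_details);
-- the inner for-with-break over common_items is the first prefix match (List.find?).
def pvLoopA : List String → List (List (String × String)) → Option String → List String →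
    (List (List (String × String)) × Option String × List String)
  | [], td, ci, cd => (td, ci, cd)
  | raw :: ls, td, ci, cd =>
    let line := PySem.Str.strip raw
    if line = "" then pvLoopA ls td ci cd
    else
      match pvCommonItems.find? (fun item => PySem.Str.startswith line item) with
      | some item =>
          let td' := match ci with
            | some cur => td ++ [pvRecord cur cd]
            | none => td
          pvLoopA ls td' (some item)
            [PySem.Str.strip (PySem.Str.slice line (some (PySem.Str.len item : Int)) none)]
      | none =>
          match ci with
          | some _ => pvLoopA ls td ci (cd ++ [line])
          | none => pvLoopA ls td ci cd

-- the trailing "Don't forget the last item" flush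
def pvFinishA (st : List (List (String × String)) × Option String × List String) :
    List (List (String × String)) :=
  match st.2.1 with
  | some cur => st.1 ++ [pvRecord cur st.2.2]
  | none => st.1

def parse_text_as_table (text : String) : List (List (String × String)) :=
  pvFinishA (pvLoopA ((PySem.Str.split? text "\n").getD []) [] none [])

-- ===== PORT B =====
-- token: Sum.inl (item, rest-of-line) for an item line, Sum.inr line for a detail line
def pvClassify (line : String) : (String × String) ⊕ String :=
  match pvCommonItems.find? (fun item => PySem.Str.startswith line item) with
  | some item =>
      Sum.inl (item, PySem.Str.strip (PySem.Str.slice line (some (PySem.Str.len item : Int)) none))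
  | none => Sum.inr line

-- pass 1: one token per non-empty stripped line
def pvTokens (lines : List String) : List ((String × String) ⊕ String) :=
  lines.filterMap (fun raw =>
    let line := PySem.Str.strip raw
    if line = "" then none else some (pvClassify line))

def pvIsDetail : (String × String) ⊕ String → Bool
  | Sum.inr _ => true
  | Sum.inl _ => false

def pvDetailOf : (String × String) ⊕ String → String
  | Sum.inr s => s
  | Sum.inl _ => ""

-- pass 2: each item token takes the following run of detail tokens; leading details are dropped
def pvGroup : List ((String × String) ⊕ String) → List (List (String × String))
  | [] => []
  | Sum.inr _ :: ts => pvGroup ts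
  | Sum.inl (name, rest) :: ts =>
      pvRecord name (rest :: (ts.takeWhile pvIsDetail).map pvDetailOf) ::
        pvGroup (ts.dropWhile pvIsDetail)
termination_by ts => ts.length
decreasing_by
  all_goals simp
  all_goals (have := List.length_dropWhile_le pvIsDetail ts; omega)

def parse_text_as_table_alt (text : String) : List (List (String × String)) :=
  pvGroup (pvTokens ((PySem.Str.split? text "\n").getD []))

-- ===== PRECONDITION & SPEC =====
def Spec_parse_text_as_table (text : String) (out : List (List (String × String))) : Prop := out = parse_text_as_table_alt text
instance (text : String) (out : List (List (String × String))) : Decidable (Spec_parse_text_as_table text out) := by unfold Spec_parse_text_as_table; infer_instance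

-- ===== CLAIM (what is proved, stated in full; the proofs are below) =====
def Claim_equal_parse_text_as_table : Prop := ∀ (text : String), Dom_parse_text_as_table text → Spec_parse_text_as_table text (parse_text_as_table text)

-- ===== LEMMAS AND PROOFS =====

lemma pvTokens_cons_skip (raw : String) (ls : List String)
    (h : PySem.Str.strip raw = "") : pvTokens (raw :: ls) = pvTokens ls := by
  simp [pvTokens, h]

lemma pvTokens_cons (raw : String) (ls : List String)
    (h : ¬ PySem.Str.strip raw = "") :
    pvTokens (raw :: ls) = pvClassify (PySem.Str.strip raw) :: pvTokens ls := by
  simp [pvTokens, pvClassify, h]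

-- A's loop with an active item equals: the pending record (current details plus the coming
-- detail run) followed by the grouping of the remaining tokens.
lemma pvLoopA_some (lines : List String) :
    ∀ (td : List (List (String × String))) (item : String) (cd : List String),
    pvFinishA (pvLoopA lines td (some item) cd)
      = td ++ pvRecord item (cd ++ ((pvTokens lines).takeWhile pvIsDetail).map pvDetailOf)
          :: pvGroup ((pvTokens lines).dropWhile pvIsDetail) := by
  induction lines with
  | nil => intro td item cd; simp [pvLoopA, pvFinishA, pvTokens, pvGroup]
  | cons raw ls ih =>
    intro td item cd
    by_cases h : PySem.Str.strip raw = ""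
    · have e1 : pvLoopA (raw :: ls) td (some item) cd = pvLoopA ls td (some item) cd := by
        simp [pvLoopA, h]
      rw [e1, pvTokens_cons_skip raw ls h, ih]
    · rcases hf : pvCommonItems.find? (fun it => PySem.Chars.startswith (PySem.Chars.strip raw.toList) it.toList)
        with _ | it
      · have e1 : pvLoopA (raw :: ls) td (some item) cd
            = pvLoopA ls td (some item) (cd ++ [PySem.Str.strip raw]) := by
          simp [pvLoopA, h, hf]
        rw [e1, ih, pvTokens_cons raw ls h]
        simp [pvClassify, hf, pvIsDetail, pvDetailOf]
      · have e1 : pvLoopA (raw :: ls) td (some item) cd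
            = pvLoopA ls (td ++ [pvRecord item cd]) (some it)
                [PySem.Str.strip (PySem.Str.slice (PySem.Str.strip raw)
                  (some (PySem.Str.len it : Int)) none)] := by
          simp [pvLoopA, h, hf]
        rw [e1, ih, pvTokens_cons raw ls h]
        simp [pvClassify, hf, pvIsDetail, pvGroup]

-- A's loop with no active item equals the grouping of the token stream.
lemma pvLoopA_none (lines : List String) :
    ∀ (td : List (List (String × String))) (cd : List String),
    pvFinishA (pvLoopA lines td none cd) = td ++ pvGroup (pvTokens lines) := by
  induction lines with
  | nil => intro td cd; simp [pvLoopA, pvFinishA, pvTokens, pvGroup]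
  | cons raw ls ih =>
    intro td cd
    by_cases h : PySem.Str.strip raw = ""
    · have e1 : pvLoopA (raw :: ls) td none cd = pvLoopA ls td none cd := by
        simp [pvLoopA, h]
      rw [e1, pvTokens_cons_skip raw ls h, ih]
    · rcases hf : pvCommonItems.find? (fun it => PySem.Chars.startswith (PySem.Chars.strip raw.toList) it.toList)
        with _ | it
      · have e1 : pvLoopA (raw :: ls) td none cd = pvLoopA ls td none cd := by
          simp [pvLoopA, h, hf]
        rw [e1, ih, pvTokens_cons raw ls h]
        simp [pvClassify, hf, pvGroup]
      · have e1 : pvLoopA (raw :: ls) td none cd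
            = pvLoopA ls td (some it)
                [PySem.Str.strip (PySem.Str.slice (PySem.Str.strip raw)
                  (some (PySem.Str.len it : Int)) none)] := by
          simp [pvLoopA, h, hf]
        rw [e1, pvLoopA_some, pvTokens_cons raw ls h]
        simp [pvClassify, hf, pvGroup]

-- ===== VERDICT (by name: the statement is the Claim_ definition above) =====
theorem parse_text_as_table_spec : Claim_equal_parse_text_as_table := by
  intro text _
  unfold Spec_parse_text_as_table parse_text_as_table parse_text_as_table_alt
  simpa using pvLoopA_none ((PySem.Str.split? text "\n").getD []) [] []
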